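-- pv_equiv track=rewrite | github.com/hborelloUFG/edge_fog_server_allocation | src/modules/my_networks.py | count_repeted_edges
-- ===== SOURCE A (Python) =====
-- def count_repeted_edges(path_list):
--     repeted_edges = {}
--
--     for pair in path_list:
--         if pair in repeted_edges:
--             repeted_edges[pair] += 1
--         else:
--             repeted_edges[pair] = 1
--
--     repeted_edges = {k: v for k, v in repeted_edges.items() if v > 1}
--
--     return len(repeted_edges)
-- ===== SOURCE B (Python) =====
-- def count_repeted_edges(path_list):
--     total = 0
--     rest = list(path_list)
--     while rest:
--         head = rest[0]
--         tail = rest[1:]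
--         rest = [p for p in tail if p != head]
--         if len(rest) < len(tail):
--             total += 1
--     return total
-- ===== Notes on version B (the rewrite author's own statement) =====
-- stated objective: alternative
-- what changed: Replaces the count-dictionary plus filtering pass with iterative partition-removal: repeatedly strip every occurrence of the first remaining pair and count a duplicate whenever the strip removes more than one element, using no dictionary or set at all.
import Mathlib
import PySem

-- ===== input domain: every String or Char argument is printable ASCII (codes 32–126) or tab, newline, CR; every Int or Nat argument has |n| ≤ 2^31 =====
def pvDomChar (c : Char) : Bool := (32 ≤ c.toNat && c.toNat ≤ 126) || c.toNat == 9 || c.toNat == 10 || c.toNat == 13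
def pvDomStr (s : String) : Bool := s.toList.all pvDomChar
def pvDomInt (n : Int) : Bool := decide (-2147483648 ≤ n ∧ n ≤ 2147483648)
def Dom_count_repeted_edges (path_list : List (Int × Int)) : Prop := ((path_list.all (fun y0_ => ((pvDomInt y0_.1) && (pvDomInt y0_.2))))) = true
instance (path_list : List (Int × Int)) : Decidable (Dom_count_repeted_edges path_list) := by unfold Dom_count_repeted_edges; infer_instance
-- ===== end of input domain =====

-- B replaces A's count-dictionary plus second filtering pass with iterative partition-removal
-- (strip all occurrences of the first remaining pair, count a duplicate when the strip removes
-- more than one element); objective: alternative (no dict/set at all; not faster).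

-- ===== PORT A =====
def count_repeted_edges (path_list : List (Int × Int)) : Int :=
  -- build the counter dict
  let repeted_edges : PySem.Dict (Int × Int) Int :=
    path_list.foldl
      (fun d pair =>
        if d.contains pair then d.insert pair (d.getD pair 0 + 1)
        else d.insert pair 1)
      PySem.Dict.empty
  -- {k: v for k, v in repeted_edges.items() if v > 1}
  let filtered : PySem.Dict (Int × Int) Int :=
    repeted_edges.items.foldl
      (fun d kv => if 1 < kv.2 then d.insert kv.1 kv.2 else d)
      PySem.Dict.empty
  (filtered.size : Int)

-- ===== PORT B =====
-- Source B's while loop: state (rest, total); each round strips all copies of rest's head.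
def countRepLoop (rest : List (Int × Int)) (total : Int) : Int :=
  match rest with
  | [] => total
  | head :: tail =>
    let rest' := tail.filter (fun p => p ≠ head)
    countRepLoop rest' (if rest'.length < tail.length then total + 1 else total)
termination_by rest.length
decreasing_by
  simp only [List.length_cons, List.length_unattach]
  exact Nat.lt_succ_of_le (le_trans (List.length_filter_le _ _) (by simp))

def count_repeted_edges_alt (path_list : List (Int × Int)) : Int :=
  countRepLoop path_list 0

-- ===== PRECONDITION & SPEC =====
def Spec_count_repeted_edges (path_list : List (Int × Int)) (out : Int) : Prop := out = count_repeted_edges_alt path_list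
instance (path_list : List (Int × Int)) (out : Int) : Decidable (Spec_count_repeted_edges path_list out) := by unfold Spec_count_repeted_edges; infer_instance

-- ===== CLAIM (what is proved, stated in full; the proofs are below) =====
def Claim_equal_count_repeted_edges : Prop := ∀ (path_list : List (Int × Int)), Dom_count_repeted_edges path_list → Spec_count_repeted_edges path_list (count_repeted_edges path_list)

-- ===== LEMMAS AND PROOFS =====

-- the common characterisation: the distinct pairs occurring more than once
def dupKeys (xs : List (Int × Int)) : List (Int × Int) :=
  (PySem.Set.ofList xs).filter (fun k => 1 < (xs.count k : Int))

-- A's counting-loop step is exactly Counter's step.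
theorem stepA_eq_modify (d : PySem.Dict (Int × Int) Int) (x : Int × Int) :
    (if d.contains x then d.insert x (d.getD x 0 + 1) else d.insert x 1)
      = d.modify x 0 (· + 1) := by
  simp only [PySem.Dict.modify]
  by_cases h : d.contains x
  · simp [h]
  · have hg : d.getD x 0 = 0 := by
      have hn : d.get? x = none := by
        rw [← Option.not_isSome_iff_eq_none, ← PySem.Dict.contains_eq_isSome_get?]
        simp [h]
      simp [PySem.Dict.getD, hn]
    simp [h, hg]

-- A's first loop builds Counter(path_list).
theorem loopA_eq_counter (path_list : List (Int × Int)) :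
    path_list.foldl
      (fun d pair =>
        if d.contains pair then d.insert pair (d.getD pair 0 + 1)
        else d.insert pair 1)
      PySem.Dict.empty = PySem.Dict.counter path_list := by
  have hf : (fun (d : PySem.Dict (Int × Int) Int) pair =>
      if d.contains pair then d.insert pair (d.getD pair 0 + 1) else d.insert pair 1)
      = (fun d x => d.modify x 0 (· + 1)) :=
    funext fun d => funext fun x => stepA_eq_modify d x
  rw [hf]; rfl

-- the dict-comprehension loop over pairs with pairwise-distinct keys keeps one entry per passing pair
theorem filter_loop_size (l : List ((Int × Int) × Int)) (d : PySem.Dict (Int × Int) Int)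
    (hfresh : ∀ kv ∈ l, d.contains kv.1 = false) (hnd : (l.map Prod.fst).Nodup) :
    (l.foldl (fun d kv => if 1 < kv.2 then d.insert kv.1 kv.2 else d) d).size
      = d.size + (l.filter (fun kv => 1 < kv.2)).length := by
  induction l generalizing d with
  | nil => simp
  | cons kv t ih =>
    simp only [List.map_cons, List.nodup_cons] at hnd
    by_cases h : 1 < kv.2
    · have hc : d.contains kv.1 = false := hfresh kv (by simp)
      have hsize : (d.insert kv.1 kv.2).size = d.size + 1 := by
        simp [PySem.Dict.insert, hc, PySem.Dict.size]
      have hfresh' : ∀ p ∈ t, (d.insert kv.1 kv.2).contains p.1 = false := by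
        intro p hp
        rw [PySem.Dict.contains_insert]
        have hne : p.1 ≠ kv.1 := fun he => hnd.1 (he ▸ List.mem_map_of_mem hp)
        simp [hne, hfresh p (List.mem_cons_of_mem _ hp)]
      rw [List.foldl_cons, if_pos h, ih _ hfresh' hnd.2, hsize, List.filter_cons,
        if_pos (by simpa using h)]
      simp; omega
    · rw [List.foldl_cons, if_neg h, ih _ (fun p hp => hfresh p (List.mem_cons_of_mem _ hp)) hnd.2,
        List.filter_cons, if_neg (by simpa using h)]

-- A's value is the number of duplicated keys.
theorem a_eq_dupKeys (xs : List (Int × Int)) :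
    count_repeted_edges xs = ((dupKeys xs).length : Int) := by
  unfold count_repeted_edges
  rw [loopA_eq_counter]
  have hA : ((PySem.Dict.counter xs).items.foldl
      (fun d kv => if 1 < kv.2 then d.insert kv.1 kv.2 else d) PySem.Dict.empty).size
      = (dupKeys xs).length := by
    rw [PySem.Dict.items_counter]
    rw [filter_loop_size _ _ (by intro kv _; rfl)
      (by simp [Function.comp_def, PySem.Set.nodup_ofList])]
    simp [dupKeys, List.filter_map, Function.comp_def]
  simp only [hA]

-- stripping the head: one round of B's loop peels exactly the head's contribution off dupKeys.
theorem dupKeys_cons (h : Int × Int) (t : List (Int × Int)) :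
    (dupKeys (h :: t)).length
      = (if h ∈ t then 1 else 0) + (dupKeys (t.filter (fun p => p ≠ h))).length := by
  set rest := t.filter (fun p => p ≠ h) with hrest
  have hnotin : h ∉ rest := by simp [hrest]
  -- membership characterisation of dupKeys
  have hmem : ∀ ys (x : Int × Int), x ∈ dupKeys ys ↔ x ∈ ys ∧ 2 ≤ ys.count x := by
    intro ys x
    rw [dupKeys, List.mem_filter, PySem.Set.mem_ofList]
    constructor
    · rintro ⟨h1, h2⟩
      simp only [decide_eq_true_eq] at h2
      exact ⟨h1, by omega⟩
    · rintro ⟨h1, h2⟩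
      refine ⟨h1, ?_⟩
      simp only [decide_eq_true_eq]
      omega
  have hperm : List.Perm (dupKeys (h :: t)) ((if h ∈ t then [h] else []) ++ dupKeys rest) := by
    have hndL : (dupKeys (h :: t)).Nodup := (PySem.Set.nodup_ofList _).filter _
    have hndR : ((if h ∈ t then [h] else []) ++ dupKeys rest).Nodup := by
      have hnd : (dupKeys rest).Nodup := (PySem.Set.nodup_ofList _).filter _
      split
      · exact List.nodup_cons.mpr ⟨fun hc => hnotin ((hmem rest h).mp hc).1, hnd⟩
      · exact hnd
    rw [List.perm_ext_iff_of_nodup hndL hndR]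
    · intro x
      rw [hmem]
      rw [List.mem_append, hmem]
      by_cases hx : x = h
      · subst hx
        have hnr : ¬ (x ∈ rest ∧ 2 ≤ rest.count x) := fun hc => hnotin hc.1
        by_cases hm : x ∈ t
        · have h1 : 1 ≤ t.count x := List.one_le_count_iff.mpr hm
          simp [hm]
        · have h0 : t.count x = 0 := List.count_eq_zero.mpr hm
          simp [hm, h0, hnr]
      · have hct : (h :: t).count x = t.count x := by simp [Ne.symm hx]
        have hcr : rest.count x = t.count x := by
          rw [hrest, List.count_filter]; simp [hx]
        have hml : x ∈ h :: t ↔ x ∈ t := by simp [hx]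
        have hmr : x ∈ rest ↔ x ∈ t := by
          rw [hrest, List.mem_filter]; simp [hx]
        have hifx : x ∈ (if h ∈ t then [h] else ([] : List (Int × Int))) ↔ False := by
          split <;> simp [hx]
        rw [hct, hcr, hml, hmr, hifx]
        tauto
  have := hperm.length_eq
  rw [this, List.length_append]
  split <;> simp
theorem filter_ne_length_lt (h : Int × Int) (t : List (Int × Int)) :
    (t.filter (fun p => p ≠ h)).length < t.length ↔ h ∈ t := by
  constructor
  · intro hlt
    by_contra hm
    have : t.filter (fun p => p ≠ h) = t := by
      apply List.filter_eq_self.mpr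
      intro a ha
      simp
      exact fun he => hm (he ▸ ha)
    rw [this] at hlt; omega
  · intro hm
    rw [List.length_filter_lt_length_iff_exists]
    exact ⟨h, hm, by simp⟩

-- B's loop computes total + |dupKeys rest|.
theorem countRepLoop_eq (rest : List (Int × Int)) (total : Int) :
    countRepLoop rest total = total + ((dupKeys rest).length : Int) := by
  induction hn : rest.length using Nat.strong_induction_on generalizing rest total with
  | _ n ih =>
    cases rest with
    | nil => simp [countRepLoop, dupKeys, PySem.Set.ofList]
    | cons head tail =>
      rw [countRepLoop]
      have hlt : (tail.filter (fun p => p ≠ head)).length < n := by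
        subst hn
        exact Nat.lt_succ_of_le (List.length_filter_le _ _)
      rw [ih _ hlt _ _ rfl]
      rw [dupKeys_cons]
      by_cases hm : head ∈ tail
      · rw [if_pos ((filter_ne_length_lt head tail).mpr hm), if_pos hm]
        push_cast; ring
      · rw [if_neg (by rw [filter_ne_length_lt]; exact hm), if_neg hm]
        push_cast; ring

-- ===== VERDICT (by name: the statement is the Claim_ definition above) =====
theorem count_repeted_edges_spec : Claim_equal_count_repeted_edges := by
  intro xs _
  unfold Spec_count_repeted_edges count_repeted_edges_alt
  rw [a_eq_dupKeys, countRepLoop_eq]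
  simp
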